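-- pv_equiv track=rewrite | github.com/luoyutianyi/Deep_learning | Practice/ChatBot/chat_service/lib/cut_sentence.py | cut_sentence_by_word
-- ===== SOURCE A (Python) =====
-- import string
--
-- letters = string.ascii_lowercase+"+"
--
-- def cut_sentence_by_word(sentence):
--     """实现中英文分词"""
--     temp = ""
--     result = []
--     for word in sentence:
--         if word.lower() in letters:
--             temp+=word.lower()
--         else:
--             if temp!="":
--                 result.append(temp)
--                 temp=""
--             result.append(word.strip())
--     if temp!="":
--         result.append(temp.lower())
--     return result
-- ===== SOURCE B (Python) =====
-- import string
-- from itertools import groupby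
--
-- letters = string.ascii_lowercase + "+"
--
-- def cut_sentence_by_word(sentence):
--     """实现中英文分词"""
--     result = []
--     for is_word, group in groupby(sentence, key=lambda c: c.lower() in letters):
--         if is_word:
--             result.append(''.join(c.lower() for c in group))
--         else:
--             for c in group:
--                 result.append(c.strip())
--     return result
-- ===== Notes on version B (the rewrite author's own statement) =====
-- stated objective: idiomatic
-- what changed: Replaces A's character-at-a-time loop with a mutable pending-buffer and end-of-loop flush by an itertools.groupby chunking into maximal letter/non-letter runs, joining each letter run directly with no carried state or final flush.
import Mathlib
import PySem

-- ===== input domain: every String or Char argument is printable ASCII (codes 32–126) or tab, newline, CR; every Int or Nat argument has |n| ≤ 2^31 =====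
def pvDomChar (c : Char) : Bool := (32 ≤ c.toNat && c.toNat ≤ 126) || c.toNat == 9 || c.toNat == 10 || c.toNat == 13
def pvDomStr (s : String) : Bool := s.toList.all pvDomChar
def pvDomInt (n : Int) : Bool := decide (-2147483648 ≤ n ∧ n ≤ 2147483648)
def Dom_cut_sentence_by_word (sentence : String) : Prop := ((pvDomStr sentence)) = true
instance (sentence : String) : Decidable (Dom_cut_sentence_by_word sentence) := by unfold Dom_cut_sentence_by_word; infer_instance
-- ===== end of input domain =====

-- B re-implements the per-character accumulator loop as a groupby-style chunking into
-- maximal letter / non-letter runs (objective: idiomatic decomposition; same cost).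

-- ===== PORT A =====
-- letters = string.ascii_lowercase + "+"
def pvLetters : String := "abcdefghijklmnopqrstuvwxyz+"

-- the test 'c.lower() in letters' (shared by both Pythons character-wise)
def pvIsWord (c : Char) : Bool := PySem.Str.isIn (String.ofList [PySem.Chars.lowerChar c]) pvLetters

-- 'c.strip()' for the one-character string of c
def pvStrip1 (c : Char) : String := PySem.Str.strip (String.ofList [c])

-- loop body of A: state (temp, result)
def pvStepA (st : String × List String) (word : Char) : String × List String :=
  if pvIsWord word then
    (st.1 ++ String.ofList [PySem.Chars.lowerChar word], st.2)
  else
    ("", (if st.1 ≠ "" then st.2 ++ [st.1] else st.2) ++ [pvStrip1 word])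

def cut_sentence_by_word (sentence : String) : List String :=
  let st := sentence.toList.foldl pvStepA ("", [])
  if st.1 ≠ "" then st.2 ++ [PySem.Str.lower st.1] else st.2

-- ===== PORT B =====
-- itertools.groupby(sentence, key = c.lower() in letters): each step consumes one maximal
-- run of equal key; a True run is joined lowercased, a False run emits c.strip() per char.
def pvGroups : List Char → List String
  | [] => []
  | c :: cs =>
    if pvIsWord c then
      String.ofList ((c :: cs.takeWhile pvIsWord).map PySem.Chars.lowerChar)
        :: pvGroups (cs.dropWhile pvIsWord)
    else
      (c :: cs.takeWhile (fun x => !pvIsWord x)).map pvStrip1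
        ++ pvGroups (cs.dropWhile (fun x => !pvIsWord x))
termination_by cs => cs.length
decreasing_by
  · exact Nat.lt_succ_of_le (List.length_dropWhile_le ..)
  · exact Nat.lt_succ_of_le (List.length_dropWhile_le ..)

def cut_sentence_by_word_alt (sentence : String) : List String := pvGroups sentence.toList

-- ===== PRECONDITION & SPEC =====
def Spec_cut_sentence_by_word (sentence : String) (out : List String) : Prop := out = cut_sentence_by_word_alt sentence
instance (sentence : String) (out : List String) : Decidable (Spec_cut_sentence_by_word sentence out) := by unfold Spec_cut_sentence_by_word; infer_instance

-- ===== CLAIM (what is proved, stated in full; the proofs are below) =====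
def Claim_equal_cut_sentence_by_word : Prop := ∀ (sentence : String), Dom_cut_sentence_by_word sentence → Spec_cut_sentence_by_word sentence (cut_sentence_by_word sentence)

-- ===== LEMMAS AND PROOFS =====

-- proof-only: the flush of a pending buffer (nothing if empty, else one token)
def pvOpt (l : List Char) : List String := if l = [] then [] else [String.ofList l]

theorem pv_char_le_toNat (a b : Char) : a ≤ b ↔ a.toNat ≤ b.toNat := ge_iff_le

theorem pv_lc_idem (c : Char) :
    PySem.Chars.lowerChar (PySem.Chars.lowerChar c) = PySem.Chars.lowerChar c := by
  unfold PySem.Chars.lowerChar PySem.Chars.isupper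
  split_ifs with h1 h2
  · exfalso
    simp only [Bool.and_eq_true, decide_eq_true_eq, pv_char_le_toNat] at h1 h2
    have hA : ('A' : Char).toNat = 65 := by decide
    have hZ : ('Z' : Char).toNat = 90 := by decide
    have hv : (Char.ofNat (c.toNat + 32)).toNat = c.toNat + 32 := by
      rw [Char.toNat_ofNat, if_pos (Or.inl (by omega))]
    omega
  · rfl
  · rfl

-- a letter-run flush followed by the groups of the rest IS the groups of the whole list
theorem pv_groups_letter_run (cs : List Char) :
    pvOpt ((cs.takeWhile pvIsWord).map PySem.Chars.lowerChar)
      ++ pvGroups (cs.dropWhile pvIsWord) = pvGroups cs := by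
  cases cs with
  | nil => simp [pvGroups, pvOpt]
  | cons c cs =>
    by_cases h : pvIsWord c
    · rw [List.takeWhile_cons_of_pos h, List.dropWhile_cons_of_pos h]
      simp [pvGroups, pvOpt, h]
    · rw [List.takeWhile_cons_of_neg h, List.dropWhile_cons_of_neg h]
      simp [pvOpt]

-- a non-letter run is emitted one stripped character at a time
theorem pv_groups_nonletter (c : Char) (cs : List Char) (h : ¬ pvIsWord c) :
    pvGroups (c :: cs) = pvStrip1 c :: pvGroups cs := by
  have hrest : (cs.takeWhile (fun x => !pvIsWord x)).map pvStrip1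
      ++ pvGroups (cs.dropWhile (fun x => !pvIsWord x)) = pvGroups cs := by
    cases cs with
    | nil => simp [pvGroups]
    | cons d ds =>
      by_cases hd : pvIsWord d
      · rw [List.takeWhile_cons_of_neg (by simp [hd]), List.dropWhile_cons_of_neg (by simp [hd])]
        simp
      · rw [List.takeWhile_cons_of_pos (by simp [hd]), List.dropWhile_cons_of_pos (by simp [hd])]
        simp [pvGroups, hd]
  rw [pvGroups]
  simp only [h, List.map_cons]
  simp [hrest]

-- main invariant: running A's loop from a pending lowered buffer ts and accumulator res
-- produces res, then the flush of ts extended by the next letter run, then the groups of the rest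
theorem pv_aux (cs : List Char) : ∀ (ts : List Char) (res : List String),
    (let st := cs.foldl pvStepA (String.ofList (ts.map PySem.Chars.lowerChar), res)
     if st.1 ≠ "" then st.2 ++ [PySem.Str.lower st.1] else st.2)
    = res ++ pvOpt ((ts ++ cs.takeWhile pvIsWord).map PySem.Chars.lowerChar)
          ++ pvGroups (cs.dropWhile pvIsWord) := by
  induction cs with
  | nil =>
    intro ts res
    simp only [List.foldl_nil, List.takeWhile_nil, List.dropWhile_nil, List.append_nil, pvGroups]
    by_cases h : ts = []
    · subst h; simp [pvOpt]
    · have hne : ts.map PySem.Chars.lowerChar ≠ [] := by simpa using h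
      rw [if_pos (by simpa using hne)]
      simp only [pvOpt, if_neg hne]
      have : PySem.Str.lower (String.ofList (ts.map PySem.Chars.lowerChar))
          = String.ofList (ts.map PySem.Chars.lowerChar) := by
        simp [PySem.Str.lower, PySem.Chars.lower, List.map_map, Function.comp_def, pv_lc_idem]
      simp [this]
  | cons c cs ih =>
    intro ts res
    by_cases h : pvIsWord c
    · rw [List.takeWhile_cons_of_pos h, List.dropWhile_cons_of_pos h]
      have hstep : pvStepA (String.ofList (ts.map PySem.Chars.lowerChar), res) c
          = (String.ofList ((ts ++ [c]).map PySem.Chars.lowerChar), res) := by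
        simp [pvStepA, h]
      simp only [List.foldl_cons, hstep]
      rw [ih (ts ++ [c]) res]
      simp
    · rw [List.takeWhile_cons_of_neg h, List.dropWhile_cons_of_neg h]
      have hstep : pvStepA (String.ofList (ts.map PySem.Chars.lowerChar), res) c
          = (String.ofList (([] : List Char).map PySem.Chars.lowerChar),
             (res ++ pvOpt (ts.map PySem.Chars.lowerChar)) ++ [pvStrip1 c]) := by
        by_cases hts : ts = []
        · subst hts; simp [pvStepA, h, pvOpt]
        · have hne : ts.map PySem.Chars.lowerChar ≠ [] := by simpa using hts
          have hcond : (String.ofList (ts.map PySem.Chars.lowerChar)) ≠ "" := by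
            simpa using hne
          simp only [pvStepA, h, if_false, Bool.false_eq_true, if_pos hcond, pvOpt,
            if_neg hne, List.map_nil]
      simp only [List.foldl_cons, hstep]
      rw [ih [] ((res ++ pvOpt (ts.map PySem.Chars.lowerChar)) ++ [pvStrip1 c])]
      rw [pv_groups_nonletter c cs h]
      simp only [List.nil_append]
      rw [← pv_groups_letter_run cs]
      simp [pvOpt]

-- ===== VERDICT (by name: the statement is the Claim_ definition above) =====
theorem cut_sentence_by_word_spec : Claim_equal_cut_sentence_by_word := by
  intro sentence _
  unfold Spec_cut_sentence_by_word cut_sentence_by_word cut_sentence_by_word_alt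
  have h := pv_aux sentence.toList [] []
  simp only [List.map_nil] at h
  rw [show (String.ofList ([] : List Char)) = "" from rfl] at h
  rw [h]
  simp only [List.nil_append, List.nil_append]
  exact pv_groups_letter_run sentence.toList
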